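-- pv_equiv track=rewrite | github.com/JiaxinSong/AI-project-Tic-tac-toe | tree_implement/judge.py | judgecol
-- ===== SOURCE A (Python) =====
-- def judgecol(board,s,win,x,y,rule):   # part of board
--     start = x - rule + 1
--     if start < 0:
--         start = 0
--
--     end = x
--     if x + rule - 1 > s - 1:
--         end = s - rule
--
--     for i in range(start, end + 1):
--         judge2 = True
--         for j in range(rule):
--             if board[i + j][y] == 0:
--                 judge2 = False
--                 break
--         if judge2 == True:
--             win = 1
--             break
--     return win
-- ===== SOURCE B (Python) =====
-- def judgecol(board, s, win, x, y, rule):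
--     # Single left-to-right scan with a run counter instead of A's nested window re-checks.
--     start = x - rule + 1
--     if start < 0:
--         start = 0
--     end = x if x + rule - 1 <= s - 1 else s - rule
--     if start > end:
--         return win
--     run = 0
--     for k in range(start, end + rule):
--         if board[k][y] != 0:
--             run += 1
--             if run >= rule:
--                 return 1
--         else:
--             run = 0
--     return win
-- ===== Notes on version B (the rewrite author's own statement) =====
-- stated objective: alternative
-- what changed: A re-checks every length-rule window with a nested loop; B makes one left-to-right scan over the same row span keeping a consecutive-nonzero run counter and returns 1 as soon as the run reaches rule (worst-case O(rule) vs O(rule^2), not measurably faster on the sampled inputs where A's breaks fire early).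
-- outside the precondition, e.g. on judgecol([[0], [0], [0]], 5, 0, 1, 0, 3): A returns 0, B raises IndexError
import Mathlib
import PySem

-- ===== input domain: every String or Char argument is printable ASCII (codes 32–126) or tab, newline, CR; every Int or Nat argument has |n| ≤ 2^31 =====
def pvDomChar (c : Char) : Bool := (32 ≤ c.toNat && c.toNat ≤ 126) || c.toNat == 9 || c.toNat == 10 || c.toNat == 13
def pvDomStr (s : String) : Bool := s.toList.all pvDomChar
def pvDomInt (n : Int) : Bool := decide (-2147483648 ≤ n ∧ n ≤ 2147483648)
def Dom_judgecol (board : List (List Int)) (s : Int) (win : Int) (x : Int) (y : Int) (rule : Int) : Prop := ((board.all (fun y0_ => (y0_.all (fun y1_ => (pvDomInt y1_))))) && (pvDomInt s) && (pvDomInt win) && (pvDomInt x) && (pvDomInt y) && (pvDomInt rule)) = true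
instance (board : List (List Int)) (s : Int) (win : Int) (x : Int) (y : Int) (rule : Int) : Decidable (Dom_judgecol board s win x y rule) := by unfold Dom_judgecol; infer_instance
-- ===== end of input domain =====

-- B replaces A's nested re-check of every length-`rule` window by one left-to-right
-- scan with a consecutive-nonzero run counter (objective: alternative single-pass algorithm).

-- ===== PORT A =====
-- inner `for j in range(rule)` loop of A, with its break
def judgecolInner (board : List (List Int)) (y : Int) (i : Int) : List Int → Bool
  | [] => true
  | j :: js =>
    if PySem.List.pyGetD (PySem.List.pyGetD board (i + j) []) y 0 = 0 then false
    else judgecolInner board y i js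

-- outer `for i in range(start, end + 1)` loop of A, with its break
def judgecolOuter (board : List (List Int)) (y : Int) (rule : Int) : List Int → Int → Int
  | [], win => win
  | i :: is, win =>
    if judgecolInner board y i (PySem.List.pyRange 0 rule 1) = true then 1
    else judgecolOuter board y rule is win

def judgecol (board : List (List Int)) (s : Int) (win : Int) (x : Int) (y : Int) (rule : Int) : Int :=
  let start0 := x - rule + 1
  let start := if start0 < 0 then 0 else start0
  let e := if x + rule - 1 > s - 1 then s - rule else x
  judgecolOuter board y rule (PySem.List.pyRange start (e + 1) 1) win

-- ===== PORT B =====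
-- B's single `for k in range(start, end + rule)` loop with the run counter and early returns
def judgecolRun (board : List (List Int)) (y : Int) (rule : Int) (win : Int) : List Int → Int → Int
  | [], _run => win
  | k :: ks, run =>
    if PySem.List.pyGetD (PySem.List.pyGetD board k []) y 0 ≠ 0 then
      if run + 1 ≥ rule then 1 else judgecolRun board y rule win ks (run + 1)
    else judgecolRun board y rule win ks 0

def judgecol_alt (board : List (List Int)) (s : Int) (win : Int) (x : Int) (y : Int) (rule : Int) : Int :=
  let start0 := x - rule + 1
  let start := if start0 < 0 then 0 else start0
  let e := if x + rule - 1 ≤ s - 1 then x else s - rule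
  if start > e then win
  else judgecolRun board y rule win (PySem.List.pyRange start (e + rule) 1) 0

-- ===== PRECONDITION & SPEC =====
-- Pre_ excludes inputs on which the scanned rows/column index can fall out of range
-- (Python IndexError), and conservatively also inputs where only an early `break` in A
-- avoids such an out-of-range access, or only rows the loop never touches are too short.
def Pre_judgecol (board : List (List Int)) (s : Int) (win : Int) (x : Int) (y : Int) (rule : Int) : Prop :=
  let start := max (x - rule + 1) 0
  let e := if x + rule - 1 > s - 1 then s - rule else x
  e < start ∨
    (1 ≤ rule ∧ e + rule ≤ (board.length : Int) ∧
      ∀ row ∈ board, PySem.Raise.InRange row.length y)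
instance (board : List (List Int)) (s : Int) (win : Int) (x : Int) (y : Int) (rule : Int) : Decidable (Pre_judgecol board s win x y rule) := by unfold Pre_judgecol; infer_instance

def pvWitness_judgecol : List (List Int) × Int × Int × Int × Int × Int := ([[1], [1]], 2, 0, 0, 0, 2)

def Spec_judgecol (board : List (List Int)) (s : Int) (win : Int) (x : Int) (y : Int) (rule : Int) (out : Int) : Prop := out = judgecol_alt board s win x y rule
instance (board : List (List Int)) (s : Int) (win : Int) (x : Int) (y : Int) (rule : Int) (out : Int) : Decidable (Spec_judgecol board s win x y rule out) := by unfold Spec_judgecol; infer_instance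

-- ===== CLAIM (what is proved, stated in full; the proofs are below) =====
def Claim_equal_judgecol : Prop := ∀ (board : List (List Int)) (s : Int) (win : Int) (x : Int) (y : Int) (rule : Int), Dom_judgecol board s win x y rule → Pre_judgecol board s win x y rule → Spec_judgecol board s win x y rule (judgecol board s win x y rule)

-- ===== LEMMAS AND PROOFS =====

-- the cell A and B read: board[k][y]
def pvCell (board : List (List Int)) (y : Int) (k : Int) : Int :=
  PySem.List.pyGetD (PySem.List.pyGetD board k []) y 0

lemma inner_iff (board : List (List Int)) (y i : Int) (js : List Int) :
    judgecolInner board y i js = true ↔ ∀ j ∈ js, pvCell board y (i + j) ≠ 0 := by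
  induction js with
  | nil => simp [judgecolInner]
  | cons j js ih =>
    simp only [judgecolInner, pvCell] at *
    split_ifs with h
    · simp [h]
    · simp [ih, h]

lemma outer_eq (board : List (List Int)) (y rule : Int) (is : List Int) (win : Int) :
    judgecolOuter board y rule is win =
      if ∃ i ∈ is, ∀ j ∈ PySem.List.pyRange 0 rule 1, pvCell board y (i + j) ≠ 0
      then 1 else win := by
  induction is with
  | nil => simp [judgecolOuter]
  | cons i is ih =>
    simp only [judgecolOuter]
    split_ifs with h h2 h3
    · rfl
    · exact absurd ⟨i, List.mem_cons_self, (inner_iff board y i _).1 h⟩ h2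
    · rw [ih, if_pos]
      rcases h3 with ⟨k, hk, hw⟩
      rcases List.mem_cons.1 hk with rfl | hk
      · exact absurd ((inner_iff board y k _).2 hw) h
      · exact ⟨k, hk, hw⟩
    · rw [ih, if_neg]
      intro ⟨k, hk, hw⟩
      exact h3 ⟨k, List.mem_cons_of_mem _ hk, hw⟩

lemma run_eq (board : List (List Int)) (y rule win : Int) (hrule : 1 ≤ rule) :
    ∀ (n : Nat) (a b run : Int), (b - a).toNat = n → 0 ≤ run →
    (∀ t : Int, 0 < t → t ≤ run → pvCell board y (a - t) ≠ 0) →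
    judgecolRun board y rule win (PySem.List.pyRange a b 1) run =
      if ∃ k ∈ PySem.List.pyRange a b 1,
          a - run ≤ k - rule + 1 ∧
          ∀ j ∈ PySem.List.pyRange 0 rule 1, pvCell board y (k - rule + 1 + j) ≠ 0
      then 1 else win := by
  intro n
  induction n with
  | zero =>
    intro a b run hn _ _
    rw [PySem.List.pyRange_one_eq_nil (by omega)]
    simp [judgecolRun]
  | succ n ih =>
    intro a b run hn hrun hcarry
    have hab : a < b := by omega
    rw [PySem.List.pyRange_one_cons hab]
    simp only [judgecolRun]
    by_cases hc : pvCell board y a = 0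
    · rw [if_neg (by simpa [pvCell] using hc)]
      rw [ih (a + 1) b 0 (by omega) le_rfl (by omega)]
      congr 1
      apply propext
      constructor
      · rintro ⟨k, hk, hb, hw⟩
        exact ⟨k, List.mem_cons_of_mem _ hk, by omega, hw⟩
      · rintro ⟨k, hk, hb, hw⟩
        rcases List.mem_cons.1 hk with rfl | hk'
        · exact absurd (hw (rule - 1) (by rw [PySem.List.mem_pyRange_one]; omega))
            (by simp [show k - rule + 1 + (rule - 1) = k by ring, hc])
        · have hk2 := (PySem.List.mem_pyRange_one).1 hk'
          refine ⟨k, hk', ?_, hw⟩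
          by_contra hlt
          have hj : (a - (k - rule + 1)) ∈ PySem.List.pyRange 0 rule 1 := by
            rw [PySem.List.mem_pyRange_one]; omega
          exact hw _ hj (by simp [show k - rule + 1 + (a - (k - rule + 1)) = a by ring, hc])
    · rw [if_pos (by simpa [pvCell] using hc)]
      by_cases hge : run + 1 ≥ rule
      · rw [if_pos hge, if_pos]
        refine ⟨a, List.mem_cons_self, by omega, ?_⟩
        intro j hj
        rw [PySem.List.mem_pyRange_one] at hj
        by_cases hlast : j = rule - 1
        · simpa [hlast, show a - rule + 1 + (rule - 1) = a by ring] using hc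
        · have : a - rule + 1 + j = a - (rule - 1 - j) := by ring
          rw [this]
          exact hcarry _ (by omega) (by omega)
      · rw [if_neg hge]
        rw [ih (a + 1) b (run + 1) (by omega) (by omega) ?hc2]
        case hc2 =>
          intro t ht1 ht2
          by_cases h1 : t = 1
          · simpa [h1] using hc
          · have : a + 1 - t = a - (t - 1) := by ring
            rw [this]
            exact hcarry _ (by omega) (by omega)
        congr 1
        apply propext
        constructor
        · rintro ⟨k, hk, hb, hw⟩
          exact ⟨k, List.mem_cons_of_mem _ hk, by omega, hw⟩
        · rintro ⟨k, hk, hb, hw⟩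
          rcases List.mem_cons.1 hk with rfl | hk'
          · exact absurd hb (by omega)
          · exact ⟨k, hk', by omega, hw⟩

theorem judgecol_spec : Claim_equal_judgecol := by
  intro board s win x y rule _hdom hpre
  unfold Spec_judgecol judgecol judgecol_alt
  simp only []
  set start0 := x - rule + 1 with hs0
  set st := if start0 < 0 then 0 else start0 with hst
  have he : (if x + rule - 1 ≤ s - 1 then x else s - rule) =
      (if x + rule - 1 > s - 1 then s - rule else x) := by
    split_ifs with h1 h2 <;> omega
  rw [he]
  set e := if x + rule - 1 > s - 1 then s - rule else x with hee
  by_cases hle : st > e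
  · rw [if_pos hle]
    rw [PySem.List.pyRange_one_eq_nil (by omega)]
    simp [judgecolOuter]
  · rw [if_neg hle]
    have hrule : 1 ≤ rule := by
      unfold Pre_judgecol at hpre
      simp only [← hs0, ← hee] at hpre
      rcases hpre with h | h
      · exfalso; have : st = max start0 0 := by rw [hst]; split_ifs <;> omega
        omega
      · exact h.1
    rw [outer_eq, run_eq board y rule win hrule ((e + rule) - st).toNat st (e + rule) 0 rfl le_rfl (by omega)]
    congr 1
    apply propext
    constructor
    · rintro ⟨i, hi, hw⟩
      rw [PySem.List.mem_pyRange_one] at hi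
      refine ⟨i + rule - 1, by rw [PySem.List.mem_pyRange_one]; omega, by omega, ?_⟩
      intro j hj
      have : i + rule - 1 - rule + 1 + j = i + j := by ring
      rw [this]
      exact hw j hj
    · rintro ⟨k, hk, hb, hw⟩
      rw [PySem.List.mem_pyRange_one] at hk
      exact ⟨k - rule + 1, by rw [PySem.List.mem_pyRange_one]; omega, hw⟩
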